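-- pv_equiv track=rewrite | github.com/Patrik-Berglund/ros2-pi-sense-hat | demo_patterns.py | matrix_rain
-- ===== SOURCE A (Python) =====
-- def matrix_rain(frame):
--     data = []
--     for y in range(8):
--         for x in range(8):
--             drop = (frame + x * 3) % 16
--             if drop < 8 and drop == y:
--                 data.extend([0, 255, 100])
--             elif drop < 8 and drop-1 == y:
--                 data.extend([0, 150, 50])
--             elif drop < 8 and drop-2 == y:
--                 data.extend([0, 80, 20])
--             else:
--                 data.extend([0, 10, 5])
--     return data
-- ===== SOURCE B (Python) =====
-- def matrix_rain(frame):
--     data = [0, 10, 5] * 64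
--     for x in range(8):
--         drop = (frame + x * 3) % 16
--         if drop < 8:
--             for off, (r, g, b) in enumerate(((0, 255, 100), (0, 150, 50), (0, 80, 20))):
--                 y = drop - off
--                 if 0 <= y < 8:
--                     i = (y * 8 + x) * 3
--                     data[i] = r
--                     data[i + 1] = g
--                     data[i + 2] = b
--     return data
-- ===== Notes on version B (the rewrite author's own statement) =====
-- stated objective: alternative
-- what changed: Instead of classifying every grid cell with a cascade of branches, B builds the flat background frame once and scatters the few head/tail pixels of each column directly at their computed flat indices.
import Mathlib
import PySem

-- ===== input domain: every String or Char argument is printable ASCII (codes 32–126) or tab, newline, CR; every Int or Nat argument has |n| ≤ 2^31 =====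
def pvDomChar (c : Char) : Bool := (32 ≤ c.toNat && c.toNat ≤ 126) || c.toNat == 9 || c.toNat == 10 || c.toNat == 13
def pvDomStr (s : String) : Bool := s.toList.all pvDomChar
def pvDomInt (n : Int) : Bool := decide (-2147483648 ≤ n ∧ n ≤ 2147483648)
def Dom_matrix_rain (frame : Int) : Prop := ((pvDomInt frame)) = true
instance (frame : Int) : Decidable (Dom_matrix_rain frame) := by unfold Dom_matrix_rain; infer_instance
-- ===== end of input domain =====

-- B replaces the per-cell 4-way classification by a background frame plus a targeted
-- scatter of the ≤3 drop pixels per column (alternative decomposition, same cost).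

-- ===== PORT A =====
def matrix_rain (frame : Int) : List Int :=
  (PySem.List.pyRange 0 8 1).foldl (fun data y =>
    (PySem.List.pyRange 0 8 1).foldl (fun data x =>
      let drop := PySem.Int.mod (frame + x * 3) 16
      if drop < 8 ∧ drop = y then data ++ [0, 255, 100]
      else if drop < 8 ∧ drop - 1 = y then data ++ [0, 150, 50]
      else if drop < 8 ∧ drop - 2 = y then data ++ [0, 80, 20]
      else data ++ [0, 10, 5]) data) []

-- ===== PORT B =====
-- data[i] = r; data[i+1] = g; data[i+2] = b  (i ≥ 0 under the guard, so .toNat is exact)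
def pvPaint3 (data : List Int) (i : Nat) (r g b : Int) : List Int :=
  ((data.set i r).set (i + 1) g).set (i + 2) b

def matrix_rain_alt (frame : Int) : List Int :=
  (PySem.List.pyRange 0 8 1).foldl (fun data x =>
    let drop := PySem.Int.mod (frame + x * 3) 16
    if drop < 8 then
      (PySem.List.enumerate [((0:Int), (255:Int), (100:Int)), (0, 150, 50), (0, 80, 20)]).foldl
        (fun data oc =>
          let y := drop - oc.1
          if 0 ≤ y ∧ y < 8 then
            pvPaint3 data ((y * 8 + x) * 3).toNat oc.2.1 oc.2.2.1 oc.2.2.2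
          else data) data
    else data)
    (PySem.List.pyRepeat [0, 10, 5] 64)

-- ===== PRECONDITION & SPEC =====
def Spec_matrix_rain (frame : Int) (out : List Int) : Prop := out = matrix_rain_alt frame
instance (frame : Int) (out : List Int) : Decidable (Spec_matrix_rain frame out) := by unfold Spec_matrix_rain; infer_instance

-- ===== CLAIM (what is proved, stated in full; the proofs are below) =====
def Claim_equal_matrix_rain : Prop := ∀ (frame : Int), Dom_matrix_rain frame → Spec_matrix_rain frame (matrix_rain frame)

-- ===== LEMMAS AND PROOFS =====

theorem pv_A_congr (f g : Int)
    (h : ∀ x : Int, PySem.Int.mod (f + x * 3) 16 = PySem.Int.mod (g + x * 3) 16) :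
    matrix_rain f = matrix_rain g := by
  unfold matrix_rain; simp only [h]

theorem pv_B_congr (f g : Int)
    (h : ∀ x : Int, PySem.Int.mod (f + x * 3) 16 = PySem.Int.mod (g + x * 3) 16) :
    matrix_rain_alt f = matrix_rain_alt g := by
  unfold matrix_rain_alt; simp only [h]

theorem pv_mod_shift (f x : Int) :
    PySem.Int.mod (f + x * 3) 16 = PySem.Int.mod (f % 16 + x * 3) 16 := by
  rw [PySem.Int.mod_eq_emod_of_pos (by norm_num), PySem.Int.mod_eq_emod_of_pos (by norm_num),
      Int.emod_add_emod]

set_option maxRecDepth 4000 in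
theorem pv_eq_small : ∀ r : Int, 0 ≤ r → r < 16 → matrix_rain r = matrix_rain_alt r := by
  intro r h1 h2
  interval_cases r <;> decide

-- ===== VERDICT (by name: the statement is the Claim_ definition above) =====
theorem matrix_rain_spec : Claim_equal_matrix_rain := by
  intro frame _
  unfold Spec_matrix_rain
  rw [pv_A_congr frame (frame % 16) (pv_mod_shift frame),
      pv_B_congr frame (frame % 16) (pv_mod_shift frame)]
  exact pv_eq_small _ (Int.emod_nonneg _ (by norm_num)) (Int.emod_lt_of_pos _ (by norm_num))
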